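-- pv_equiv track=rewrite | github.com/AdamPiechowiak/Tree | skrypt.py | zamien2
-- ===== SOURCE A (Python) =====
-- def zamien2(tab):
--
-- 	wynik = []
--
-- 	n = int(len(tab)/2)
--
-- 	for i in range(n):
-- 		wynik.append(tab[i*2+1])
-- 		wynik.append(tab[i*2])
-- 	wynik=wynik[::-1]
--
-- 	return wynik
-- ===== SOURCE B (Python) =====
-- def zamien2(tab):
--     wynik = []
--     m = len(tab) - len(tab) % 2
--     i = m - 2
--     while i >= 0:
--         wynik.append(tab[i])
--         wynik.append(tab[i + 1])
--         i -= 2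
--     return wynik
-- ===== Notes on version B (the rewrite author's own statement) =====
-- stated objective: simpler
-- what changed: B replaces A's forward loop that swaps elements within each pair and then reverses the whole list with a slice by a single backward while-loop walking the index down by two and emitting each pair un-swapped, so no swap and no final reversal pass is needed.
import Mathlib
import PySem

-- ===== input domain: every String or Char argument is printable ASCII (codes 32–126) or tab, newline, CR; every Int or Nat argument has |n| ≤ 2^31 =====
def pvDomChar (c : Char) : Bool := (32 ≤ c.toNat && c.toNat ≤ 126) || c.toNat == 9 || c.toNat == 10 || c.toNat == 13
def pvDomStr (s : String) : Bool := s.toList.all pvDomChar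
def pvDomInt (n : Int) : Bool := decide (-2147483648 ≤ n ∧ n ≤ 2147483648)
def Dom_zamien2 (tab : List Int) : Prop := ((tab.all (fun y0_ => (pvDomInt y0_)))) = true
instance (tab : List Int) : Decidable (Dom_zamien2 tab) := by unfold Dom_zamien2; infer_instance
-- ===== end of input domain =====

-- B replaces A's forward loop (swap within each pair, then reverse the whole list by slicing)
-- with a single backward while-loop stepping the index down by two and emitting each pair
-- un-swapped, so no swap and no final reversal pass is needed; objective: simpler.

-- ===== PORT A =====
-- literal port of A: forward loop over range(n) appending tab[2i+1] then tab[2i], then wynik[::-1]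
def zamien2 (tab : List Int) : List Int :=
  let n : Int := PySem.Int.truncdiv (tab.length : Int) 2   -- int(len(tab)/2)
  let wynik : List Int :=
    (PySem.List.pyRange 0 n 1).foldl
      (fun w i => (w ++ [PySem.List.pyGetD tab (i * 2 + 1) 0]) ++ [PySem.List.pyGetD tab (i * 2) 0]) []
  (PySem.List.slice? wynik none none (-1)).getD []   -- wynik[::-1]; step -1 ≠ 0, never none

-- ===== PORT B =====
-- literal port of B's while loop: while i >= 0: append tab[i]; append tab[i+1]; i -= 2
def zamien2AltGo (tab : List Int) (i : Int) (wynik : List Int) : List Int :=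
  if _h : 0 ≤ i then
    zamien2AltGo tab (i - 2) ((wynik ++ [PySem.List.pyGetD tab i 0]) ++ [PySem.List.pyGetD tab (i + 1) 0])
  else wynik
termination_by (i + 2).toNat
decreasing_by omega

def zamien2_alt (tab : List Int) : List Int :=
  let m : Int := (tab.length : Int) - PySem.Int.mod (tab.length : Int) 2   -- len(tab) - len(tab) % 2
  zamien2AltGo tab (m - 2) []

-- ===== PRECONDITION & SPEC =====
def Spec_zamien2 (tab : List Int) (out : List Int) : Prop := out = zamien2_alt tab
instance (tab : List Int) (out : List Int) : Decidable (Spec_zamien2 tab out) := by unfold Spec_zamien2; infer_instance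

-- ===== CLAIM (what is proved, stated in full; the proofs are below) =====
def Claim_equal_zamien2 : Prop := ∀ (tab : List Int), Dom_zamien2 tab → Spec_zamien2 tab (zamien2 tab)

-- ===== LEMMAS AND PROOFS =====
-- A's loop result, rewritten as a reversed flatMap over Nat indices
theorem zamien2_flat (tab : List Int) :
    zamien2 tab =
      ((List.range (tab.length / 2)).flatMap
        (fun k => [tab.getD (2 * k + 1) 0, tab.getD (2 * k) 0])).reverse := by
  show ((PySem.List.pyRange 0 (PySem.Int.truncdiv (tab.length : Int) 2) 1).foldl
      (fun w i => (w ++ [PySem.List.pyGetD tab (i * 2 + 1) 0]) ++ [PySem.List.pyGetD tab (i * 2) 0]) []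
      |> fun wynik => (PySem.List.slice? wynik none none (-1)).getD []) = _
  rw [show (fun (w : List Int) i => (w ++ [PySem.List.pyGetD tab (i * 2 + 1) 0]) ++ [PySem.List.pyGetD tab (i * 2) 0])
        = fun w i => w ++ [PySem.List.pyGetD tab (i * 2 + 1) 0, PySem.List.pyGetD tab (i * 2) 0]
      from by funext w i; simp]
  show (PySem.List.slice? ((PySem.List.pyRange 0 (PySem.Int.truncdiv (tab.length : Int) 2) 1).foldl
      (fun w i => w ++ [PySem.List.pyGetD tab (i * 2 + 1) 0, PySem.List.pyGetD tab (i * 2) 0]) []) none none (-1)).getD [] = _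
  rw [PySem.List.foldl_append_eq_flatMap, PySem.List.slice?_none_none_neg_one]
  simp only [Option.getD_some, List.nil_append]
  congr 1
  rw [show PySem.Int.truncdiv (tab.length : Int) 2 = ((tab.length / 2 : Nat) : Int) from by
        simp only [PySem.Int.truncdiv]
        rw [Int.tdiv_eq_ediv_of_nonneg (by positivity)]
        omega,
      PySem.List.pyRange_zero_natCast, List.flatMap_map]
  apply List.flatMap_congr
  intro k _
  rw [show ((k : Int) * 2 + 1) = ((2 * k + 1 : Nat) : Int) from by push_cast; ring,
      show ((k : Int) * 2) = ((2 * k : Nat) : Int) from by push_cast; ring,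
      PySem.List.pyGetD_natCast, PySem.List.pyGetD_natCast]

-- the while loop starting at index 2*j emits the pairs j, j-1, …, 0 un-swapped
theorem zamien2AltGo_eq (tab : List Int) : ∀ (j : Nat) (w : List Int),
    zamien2AltGo tab (2 * (j : Int)) w =
      w ++ (List.range (j + 1)).reverse.flatMap
        (fun k => [tab.getD (2 * k) 0, tab.getD (2 * k + 1) 0]) := by
  intro j
  induction j with
  | zero =>
      intro w
      rw [zamien2AltGo]
      simp only [Nat.cast_zero, mul_zero, le_refl, dif_pos]
      rw [zamien2AltGo]
      simp [PySem.List.pyGetD_ofNat', List.getD]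
  | succ j ih =>
      intro w
      rw [zamien2AltGo]
      simp only [dif_pos (by positivity : (0:Int) ≤ 2 * ((j+1 : Nat) : Int))]
      rw [show (2 * ((j+1 : Nat) : Int) - 2) = 2 * (j : Int) from by push_cast; ring, ih]
      rw [List.range_succ (n := j + 1), List.reverse_append, List.reverse_singleton,
          List.singleton_append, List.flatMap_cons]
      rw [show (2 * ((j+1 : Nat) : Int)) = ((2 * (j+1) : Nat) : Int) from by push_cast; ring,
          show (((2 * (j+1) : Nat) : Int) + 1) = ((2 * (j+1) + 1 : Nat) : Int) from by push_cast; ring,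
          PySem.List.pyGetD_natCast, PySem.List.pyGetD_natCast]
      simp [List.getD]

-- B equals the same reversed flatMap as A
theorem alt_flat (tab : List Int) :
    zamien2_alt tab =
      ((List.range (tab.length / 2)).flatMap
        (fun k => [tab.getD (2 * k + 1) 0, tab.getD (2 * k) 0])).reverse := by
  show zamien2AltGo tab ((tab.length : Int) - PySem.Int.mod (tab.length : Int) 2 - 2) [] = _
  rw [List.reverse_flatMap,
      show PySem.Int.mod (tab.length : Int) 2 = ((tab.length % 2 : Nat) : Int) from by
        exact_mod_cast PySem.Int.mod_natCast tab.length 2]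
  rcases Nat.eq_zero_or_pos (tab.length / 2) with h | h
  · rw [h]
    rw [zamien2AltGo]
    simp only [dif_neg (show ¬ (0:Int) ≤ (tab.length : Int) - ((tab.length % 2 : Nat) : Int) - 2 from by
      push_cast; omega)]
    simp
  · rw [show (tab.length : Int) - ((tab.length % 2 : Nat) : Int) - 2
        = 2 * ((tab.length / 2 - 1 : Nat) : Int) from by push_cast [h]; omega,
      zamien2AltGo_eq, Nat.sub_add_cancel h, List.nil_append]
    apply List.flatMap_congr
    intro k _
    simp [mul_comm]

-- ===== VERDICT (by name: the statement is the Claim_ definition above) =====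
theorem zamien2_spec : Claim_equal_zamien2 := by
  intro tab _
  unfold Spec_zamien2
  rw [zamien2_flat, alt_flat]
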